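-- pv_equiv track=rewrite | github.com/monsterJuk/Tinkoff_contest | bojko/exam5.py | exam5_dicted
-- ===== SOURCE A (Python) =====
-- def exam5_dicted(n: int, s: int, a: list[int]):
--     d = dict()
--     total = 0
--     for m in range(n):
--         for r in range(m, n):
--             if (m, r) in d:
--                 total += d[m, r]
--             else:
--                 local_total = 0
--                 b = [b for b in a[m:r + 1]]
--                 tail = 0
--                 while b:
--                     bpop = b.pop()
--                     if tail + bpop > s:
--                         local_total += 1
--                         tail = bpop
--                     else:
--                         tail += bpop
--                 if tail:
--                     local_total += 1
--                 d[m, r] = local_total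
--                 total += local_total
--     return total
-- ===== SOURCE B (Python) =====
-- def exam5_dicted(n: int, s: int, a: list[int]):
--     # For each right end r, extend the left end m downward reusing the greedy
--     # state: one (count, tail) pair per r gives every subarray [m, r] in O(1).
--     L = len(a)
--     total = 0
--     for r in range(n):
--         e = r if r < L else L - 1
--         count = 0
--         tail = 0
--         for m in range(e, -1, -1):
--             x = a[m]
--             if tail + x > s:
--                 count += 1
--                 tail = x
--             else:
--                 tail += x
--             total += count + (1 if tail else 0)
--     return total
-- ===== Notes on version B (the rewrite author's own statement) =====
-- stated objective: faster
-- what changed: Instead of running the greedy bin-packing from scratch for every (m,r) pair (A's memo dict never hits, so A is cubic), B fixes the right end r and extends the left end m downward, reusing one incremental greedy (count,tail) state per r, so each subarray costs O(1).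
import Mathlib
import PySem

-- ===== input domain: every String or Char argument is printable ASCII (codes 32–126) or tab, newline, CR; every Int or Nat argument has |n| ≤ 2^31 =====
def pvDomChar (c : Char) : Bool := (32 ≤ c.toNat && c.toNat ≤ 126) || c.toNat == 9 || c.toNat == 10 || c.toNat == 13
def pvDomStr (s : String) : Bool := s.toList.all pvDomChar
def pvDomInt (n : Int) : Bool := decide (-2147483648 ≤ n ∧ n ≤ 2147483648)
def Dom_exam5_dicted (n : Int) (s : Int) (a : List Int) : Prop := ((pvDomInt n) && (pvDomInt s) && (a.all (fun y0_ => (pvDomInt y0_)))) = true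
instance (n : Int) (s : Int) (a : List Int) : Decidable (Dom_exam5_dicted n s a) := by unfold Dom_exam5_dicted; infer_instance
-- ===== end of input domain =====

-- B replaces A's per-subarray greedy re-run (A's memo dict never hits) by one incremental
-- greedy state per right end r, extended leftward; return value proved equal on all inputs.

-- ===== PORT A =====
-- A's 'while b: bpop = b.pop(); …' loop: pops the LAST element each iteration
def aWhile (s : Int) (b : List Int) (tail : Int) (localTotal : Int) : Int :=
  match h : b with
  | [] => if tail ≠ 0 then localTotal + 1 else localTotal
  | x :: xs =>
    let bpop := (x :: xs).getLast (by simp)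
    let b' := (x :: xs).dropLast
    if tail + bpop > s then aWhile s b' bpop (localTotal + 1)
    else aWhile s b' (tail + bpop) localTotal
termination_by b.length
decreasing_by all_goals simp [List.length_dropLast]

def exam5_dicted (n : Int) (s : Int) (a : List Int) : Int :=
  ((PySem.List.pyRange 0 n 1).foldl (fun (st : PySem.Dict (Int × Int) Int × Int) m =>
    (PySem.List.pyRange m n 1).foldl (fun (st : PySem.Dict (Int × Int) Int × Int) r =>
      match st.1.get? (m, r) with
      | some v => (st.1, st.2 + v)
      | none =>
        let b := PySem.List.slice a (some m) (some (r + 1))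
        let localTotal := aWhile s b 0 0
        (st.1.insert (m, r) localTotal, st.2 + localTotal)) st)
    (PySem.Dict.empty, 0)).2

-- ===== PORT B =====
def exam5_dicted_alt (n : Int) (s : Int) (a : List Int) : Int :=
  let L : Int := (a.length : Int)
  (PySem.List.pyRange 0 n 1).foldl (fun (total : Int) r =>
    let e := if r < L then r else L - 1
    ((PySem.List.pyRange e (-1) (-1)).foldl
      (fun (st : Int × Int × Int) m =>
        let x := PySem.List.pyGetD a m 0
        if st.2.1 + x > s then
          (st.1 + 1, x, st.2.2 + (st.1 + 1) + (if x ≠ 0 then 1 else 0))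
        else
          (st.1, st.2.1 + x, st.2.2 + st.1 + (if st.2.1 + x ≠ 0 then 1 else 0)))
      (0, 0, total)).2.2) 0

-- ===== PRECONDITION & SPEC =====
def Spec_exam5_dicted (n : Int) (s : Int) (a : List Int) (out : Int) : Prop := out = exam5_dicted_alt n s a
instance (n : Int) (s : Int) (a : List Int) (out : Int) : Decidable (Spec_exam5_dicted n s a out) := by unfold Spec_exam5_dicted; infer_instance

-- ===== CLAIM (what is proved, stated in full; the proofs are below) =====
def Claim_equal_exam5_dicted : Prop := ∀ (n : Int) (s : Int) (a : List Int), Dom_exam5_dicted n s a → Spec_exam5_dicted n s a (exam5_dicted n s a)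

-- ===== LEMMAS AND PROOFS =====

-- the greedy step shared by both programs, its final count, and the value of one subarray
def gstep (s : Int) (st : Int × Int) (x : Int) : Int × Int :=
  if st.2 + x > s then (st.1 + 1, x) else (st.1, st.2 + x)

def gfin (st : Int × Int) : Int := if st.2 ≠ 0 then st.1 + 1 else st.1

def fval (s : Int) (a : List Int) (m r : Int) : Int :=
  gfin ((PySem.List.slice a (some m) (some (r + 1))).reverse.foldl (gstep s) (0, 0))

def fvalA (s : Int) (a : List Int) (m r : Int) : Int :=
  aWhile s (PySem.List.slice a (some m) (some (r + 1))) 0 0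

theorem aWhile_eq (s : Int) (b : List Int) : ∀ (tail localTotal : Int),
    aWhile s b tail localTotal = gfin (b.reverse.foldl (gstep s) (localTotal, tail)) := by
  induction b using List.reverseRecOn with
  | nil => intro tail localTotal; simp [aWhile, gfin]
  | append_singleton bs x ih =>
    intro tail localTotal
    have hne : bs ++ [x] ≠ [] := by simp
    rw [show aWhile s (bs ++ [x]) tail localTotal =
      (if tail + (bs ++ [x]).getLast hne > s then
        aWhile s (bs ++ [x]).dropLast ((bs ++ [x]).getLast hne) (localTotal + 1)
      else aWhile s (bs ++ [x]).dropLast (tail + (bs ++ [x]).getLast hne) localTotal) from by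
        cases bs <;> simp [aWhile]]
    have hl : (bs ++ [x]).getLast hne = x := by simp
    have hd : (bs ++ [x]).dropLast = bs := by simp
    have hr : (bs ++ [x]).reverse = x :: bs.reverse := by simp
    rw [hl, hd, hr, List.foldl_cons]
    show _ = gfin (bs.reverse.foldl (gstep s) (gstep s (localTotal, tail) x))
    unfold gstep
    split_ifs with h1 <;> rw [ih] <;> rfl

theorem fvalA_eq (s : Int) (a : List Int) : fvalA s a = fval s a := by
  funext m r
  unfold fvalA fval
  rw [aWhile_eq]

-- A's inner loop over r: the memo dict never hits (each key (m, r) is visited once),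
-- so it adds the greedy value of every a[m:r+1] and only touches keys with first component m
theorem innerA (s : Int) (a : List Int) (m : Int) :
    ∀ (rs : List Int) (d : PySem.Dict (Int × Int) Int) (total : Int),
    rs.Nodup → (∀ r ∈ rs, d.get? (m, r) = none) →
    (rs.foldl (fun (st : PySem.Dict (Int × Int) Int × Int) r =>
      match st.1.get? (m, r) with
      | some v => (st.1, st.2 + v)
      | none =>
        let b := PySem.List.slice a (some m) (some (r + 1))
        let localTotal := aWhile s b 0 0
        (st.1.insert (m, r) localTotal, st.2 + localTotal)) (d, total)).2
      = total + (rs.map (fvalA s a m)).sum ∧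
    ∀ k : Int × Int, k.1 ≠ m →
    (rs.foldl (fun (st : PySem.Dict (Int × Int) Int × Int) r =>
      match st.1.get? (m, r) with
      | some v => (st.1, st.2 + v)
      | none =>
        let b := PySem.List.slice a (some m) (some (r + 1))
        let localTotal := aWhile s b 0 0
        (st.1.insert (m, r) localTotal, st.2 + localTotal)) (d, total)).1.get? k
      = d.get? k := by
  intro rs
  induction rs with
  | nil => intro d total _ _; simp
  | cons r rs ih =>
    intro d total hnd hnone
    have hdr : d.get? (m, r) = none := hnone r (by simp)
    rw [List.foldl_cons, hdr]
    have hstep : ∀ k : Int × Int, k ≠ (m, r) →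
        (d.insert (m, r) (fvalA s a m r)).get? k = d.get? k := fun k hk =>
      PySem.Dict.get?_insert_of_ne _ _ hk
    have hnone' : ∀ r' ∈ rs, (d.insert (m, r) (fvalA s a m r)).get? (m, r') = none := by
      intro r' hr'
      rw [hstep (m, r') (by simp; rintro rfl; exact (List.nodup_cons.mp hnd).1 hr')]
      exact hnone r' (by simp [hr'])
    have := ih (d.insert (m, r) (fvalA s a m r)) (total + fvalA s a m r)
      (List.nodup_cons.mp hnd).2 hnone'
    have hinit : (match (none : Option Int) with
      | some v => ((d, total).1, (d, total).2 + v)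
      | none =>
        let b := PySem.List.slice a (some m) (some (r + 1))
        let localTotal := aWhile s b 0 0
        ((d, total).1.insert (m, r) localTotal, (d, total).2 + localTotal))
      = (d.insert (m, r) (fvalA s a m r), total + fvalA s a m r) := rfl
    rw [hinit]
    refine ⟨?_, ?_⟩
    · rw [this.1]; simp [List.sum_cons]; ring
    · intro k hk
      rw [this.2 k hk, hstep k (by intro h; apply hk; rw [h])]

-- A's outer loop over m, threading the dict through
theorem outerA (n s : Int) (a : List Int) :
    ∀ (ms : List Int) (d : PySem.Dict (Int × Int) Int) (total : Int),
    ms.Nodup → (∀ m ∈ ms, ∀ r : Int, d.get? (m, r) = none) →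
    (ms.foldl (fun (st : PySem.Dict (Int × Int) Int × Int) m =>
      (PySem.List.pyRange m n 1).foldl (fun (st : PySem.Dict (Int × Int) Int × Int) r =>
        match st.1.get? (m, r) with
        | some v => (st.1, st.2 + v)
        | none =>
          let b := PySem.List.slice a (some m) (some (r + 1))
          let localTotal := aWhile s b 0 0
          (st.1.insert (m, r) localTotal, st.2 + localTotal)) st) (d, total)).2
      = total + (ms.map (fun m => ((PySem.List.pyRange m n 1).map (fvalA s a m)).sum)).sum := by
  intro ms
  induction ms with
  | nil => intro d total _ _; simp
  | cons m ms ih =>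
    intro d total hnd hnone
    rw [List.foldl_cons]
    have hin := innerA s a m (PySem.List.pyRange m n 1) d total
      (PySem.List.nodup_pyRange_one _ _) (fun r _ => hnone m (by simp) r)
    obtain ⟨⟨d1, t1⟩, hd1⟩ : ∃ p : PySem.Dict (Int × Int) Int × Int,
        (PySem.List.pyRange m n 1).foldl (fun (st : PySem.Dict (Int × Int) Int × Int) r =>
          match st.1.get? (m, r) with
          | some v => (st.1, st.2 + v)
          | none =>
            let b := PySem.List.slice a (some m) (some (r + 1))
            let localTotal := aWhile s b 0 0
            (st.1.insert (m, r) localTotal, st.2 + localTotal)) (d, total) = p :=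
      ⟨_, rfl⟩
    rw [hd1] at hin ⊢
    have ht1 : t1 = total + ((PySem.List.pyRange m n 1).map (fvalA s a m)).sum := hin.1
    have hnone1 : ∀ m' ∈ ms, ∀ r : Int, d1.get? (m', r) = none := by
      intro m' hm' r
      have hne : (m', r).1 ≠ m := by
        simp only []
        rintro rfl
        exact (List.nodup_cons.mp hnd).1 hm'
      rw [hin.2 (m', r) hne]
      exact hnone m' (by simp [hm']) r
    rw [ih d1 t1 (List.nodup_cons.mp hnd).2 hnone1, ht1]
    simp [List.sum_cons]; ring

theorem A_eq_sum (n s : Int) (a : List Int) :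
    exam5_dicted n s a =
      ((PySem.List.pyRange 0 n 1).map (fun m =>
        ((PySem.List.pyRange m n 1).map (fvalA s a m)).sum)).sum := by
  unfold exam5_dicted
  rw [outerA n s a (PySem.List.pyRange 0 n 1) PySem.Dict.empty 0
    (PySem.List.nodup_pyRange_one _ _) (fun m _ r => PySem.Dict.get?_empty _)]
  ring

-- exchanging the two triangular sums: Σ_m Σ_{r≥m} = Σ_r Σ_{m≤r}
theorem sum_swap_nat (f : Int → Int → Int) :
    ∀ N : Nat,
    ((PySem.List.pyRange 0 (N : Int) 1).map (fun m =>
      ((PySem.List.pyRange m (N : Int) 1).map (fun r => f m r)).sum)).sum =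
    ((PySem.List.pyRange 0 (N : Int) 1).map (fun r =>
      ((PySem.List.pyRange 0 (r + 1) 1).map (fun m => f m r)).sum)).sum := by
  intro N
  induction N with
  | zero => simp [PySem.List.pyRange_one_eq_nil]
  | succ N ih =>
    have hsplit : PySem.List.pyRange 0 ((N : Int) + 1) 1
        = PySem.List.pyRange 0 (N : Int) 1 ++ [(N : Int)] :=
      PySem.List.pyRange_one_succ_right (by positivity)
    push_cast
    rw [hsplit, List.map_append, List.map_append, List.sum_append, List.sum_append]
    have hinner : ∀ m ∈ PySem.List.pyRange 0 (N : Int) 1,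
        ((PySem.List.pyRange m ((N : Int) + 1) 1).map (fun r => f m r)).sum
          = ((PySem.List.pyRange m (N : Int) 1).map (fun r => f m r)).sum + f m N := by
      intro m hm
      have hm' := (PySem.List.mem_pyRange_one).mp hm
      rw [PySem.List.pyRange_one_succ_right (by omega), List.map_append, List.sum_append]
      simp
    rw [List.map_congr_left hinner]
    have hexp : ((PySem.List.pyRange 0 (N : Int) 1).map
        (fun m => ((PySem.List.pyRange m (N : Int) 1).map (fun r => f m r)).sum + f m N)).sum
        = ((PySem.List.pyRange 0 (N : Int) 1).map
            (fun m => ((PySem.List.pyRange m (N : Int) 1).map (fun r => f m r)).sum)).sum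
          + ((PySem.List.pyRange 0 (N : Int) 1).map (fun m => f m N)).sum :=
      PySem.List.sum_map_add_int _ _ _
    rw [hexp, ih]
    have hlast : ((PySem.List.pyRange (N : Int) ((N : Int) + 1) 1).map (fun r => f N r)).sum
        = f N N := by rw [PySem.List.pyRange_one_singleton]; simp
    have hlast2 : (([(N : Int)]).map (fun r =>
        ((PySem.List.pyRange 0 (r + 1) 1).map (fun m => f m r)).sum)).sum
        = ((PySem.List.pyRange 0 (N : Int) 1).map (fun m => f m N)).sum + f N N := by
      simp only [List.map_cons, List.map_nil, List.sum_cons, List.sum_nil, add_zero]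
      rw [PySem.List.pyRange_one_succ_right (by positivity), List.map_append, List.sum_append]
      simp
    rw [hlast2]
    simp only [List.map_cons, List.map_nil, List.sum_cons, List.sum_nil, add_zero, hlast]
    ring

theorem sum_swap (n : Int) (f : Int → Int → Int) :
    ((PySem.List.pyRange 0 n 1).map (fun m =>
      ((PySem.List.pyRange m n 1).map (fun r => f m r)).sum)).sum =
    ((PySem.List.pyRange 0 n 1).map (fun r =>
      ((PySem.List.pyRange 0 (r + 1) 1).map (fun m => f m r)).sum)).sum := by
  by_cases h : n ≤ 0
  · rw [PySem.List.pyRange_one_eq_nil h]; simp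
  · have : n = ((n.toNat : Nat) : Int) := by omega
    rw [this]; exact sum_swap_nat f n.toNat

-- slice facts used on the B side
theorem slice_snoc (a : List Int) (m e : Int) (h0 : 0 ≤ m) (hme : m ≤ e) (hL : e < (a.length : Int)) :
    PySem.List.slice a (some m) (some (e + 1)) =
      PySem.List.slice a (some m) (some e) ++ [a[e.toNat]'(by omega)] := by
  rw [PySem.List.slice_toNat a h0 (by omega), PySem.List.slice_toNat a h0 (by omega)]
  have h1 : (e + 1).toNat - m.toNat = (e.toNat - m.toNat) + 1 := by omega
  rw [h1, List.take_add_one]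
  congr 1
  have hlt : e.toNat - m.toNat < (a.drop m.toNat).length := by
    simp [List.length_drop]; omega
  rw [List.getElem?_eq_getElem hlt]
  simp [List.getElem_drop]
  congr 1
  omega

theorem slice_single (a : List Int) (e : Int) (h0 : 0 ≤ e) (hL : e < (a.length : Int)) :
    PySem.List.slice a (some e) (some (e + 1)) = [a[e.toNat]'(by omega)] := by
  have := slice_snoc a e e h0 le_rfl hL
  rw [this, PySem.List.slice_toNat a h0 h0]
  simp

theorem slice_clamp (a : List Int) (m b b' : Int) (h0 : 0 ≤ m)
    (hb : (a.length : Int) ≤ b) (hb' : (a.length : Int) ≤ b') :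
    PySem.List.slice a (some m) (some b) = PySem.List.slice a (some m) (some b') := by
  rw [PySem.List.slice_toNat a h0 (by omega), PySem.List.slice_toNat a h0 (by omega)]
  rw [List.take_of_length_le (by simp [List.length_drop]; omega),
      List.take_of_length_le (by simp [List.length_drop]; omega)]

theorem slice_past (a : List Int) (m b : Int) (h : (a.length : Int) ≤ m) (hb : 0 ≤ b) :
    PySem.List.slice a (some m) (some b) = [] := by
  rw [PySem.List.slice_toNat a (by omega) hb]
  rw [List.drop_of_length_le (by omega)]; simp

-- B's inner countdown loop computes the greedy value of a[m..e] for every m in [0, e]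
theorem bInner (s : Int) (a : List Int) :
    ∀ (K : Nat) (e : Int), (e + 1).toNat = K → e < (a.length : Int) →
    ∀ (c t tot : Int),
    ((PySem.List.pyRange e (-1) (-1)).foldl
      (fun (st : Int × Int × Int) m =>
        let x := PySem.List.pyGetD a m 0
        if st.2.1 + x > s then
          (st.1 + 1, x, st.2.2 + (st.1 + 1) + (if x ≠ 0 then 1 else 0))
        else
          (st.1, st.2.1 + x, st.2.2 + st.1 + (if st.2.1 + x ≠ 0 then 1 else 0)))
      (c, t, tot)).2.2
    = tot + ((PySem.List.pyRange 0 (e + 1) 1).map (fun m =>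
        gfin ((PySem.List.slice a (some m) (some (e + 1))).reverse.foldl (gstep s) (c, t)))).sum := by
  intro K
  induction K with
  | zero =>
    intro e hK hL c t tot
    rw [PySem.List.pyRange_neg_one_eq_nil (by omega), PySem.List.pyRange_one_eq_nil (by omega)]
    simp
  | succ K ih =>
    intro e hK hL c t tot
    have he0 : 0 ≤ e := by omega
    rw [PySem.List.pyRange_neg_one_cons (by omega), List.foldl_cons]
    have hx : PySem.List.pyGetD a e 0 = a[e.toNat]'(by omega) :=
      PySem.List.pyGetD_eq_getElem a 0 (by omega) (by omega)
    set x := a[e.toNat]'(by omega) with hxdef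
    have hstep : (let x := PySem.List.pyGetD a e 0
        if (c, t, tot).2.1 + x > s then
          ((c, t, tot).1 + 1, x, (c, t, tot).2.2 + ((c, t, tot).1 + 1) + if x ≠ 0 then 1 else 0)
        else
          ((c, t, tot).1, (c, t, tot).2.1 + x,
            (c, t, tot).2.2 + (c, t, tot).1 + if (c, t, tot).2.1 + x ≠ 0 then 1 else 0))
        = ((gstep s (c, t) x).1, (gstep s (c, t) x).2, tot + gfin (gstep s (c, t) x)) := by
      simp only [hx, gstep, gfin]
      split_ifs <;> simp_all <;> ring
    rw [hstep]
    rw [ih (e - 1) (by omega) (by omega)]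
    simp only [show e - 1 + 1 = e from by ring]
    have hsplit : PySem.List.pyRange 0 (e + 1) 1 = PySem.List.pyRange 0 e 1 ++ [e] :=
      PySem.List.pyRange_one_succ_right he0
    rw [hsplit, List.map_append, List.sum_append]
    have hterm : ∀ m ∈ PySem.List.pyRange 0 e 1,
        gfin ((PySem.List.slice a (some m) (some e)).reverse.foldl (gstep s)
          ((gstep s (c, t) x).1, (gstep s (c, t) x).2))
        = gfin ((PySem.List.slice a (some m) (some (e + 1))).reverse.foldl (gstep s) (c, t)) := by
      intro m hm
      have hm' := (PySem.List.mem_pyRange_one).mp hm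
      rw [slice_snoc a m e (by omega) (by omega) hL]
      rw [List.reverse_append, List.reverse_singleton, List.singleton_append, List.foldl_cons]
    rw [List.map_congr_left hterm]
    have hlaste : gfin ((PySem.List.slice a (some e) (some (e + 1))).reverse.foldl (gstep s) (c, t))
        = gfin (gstep s (c, t) x) := by
      rw [slice_single a e he0 hL]
      simp only [List.reverse_cons, List.reverse_nil, List.nil_append, List.foldl_cons,
        List.foldl_nil]
      rw [hxdef]
    simp only [List.map_cons, List.map_nil, List.sum_cons, List.sum_nil, add_zero, hlaste]
    ring

-- per right end r, B adds exactly Σ_{m ≤ r} fval m r (indices past len(a) contribute 0)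
theorem contrib (s : Int) (a : List Int) (r : Int) (hr : 0 ≤ r) (tot : Int) :
    ((PySem.List.pyRange (if r < (a.length : Int) then r else (a.length : Int) - 1) (-1) (-1)).foldl
      (fun (st : Int × Int × Int) m =>
        let x := PySem.List.pyGetD a m 0
        if st.2.1 + x > s then
          (st.1 + 1, x, st.2.2 + (st.1 + 1) + (if x ≠ 0 then 1 else 0))
        else
          (st.1, st.2.1 + x, st.2.2 + st.1 + (if st.2.1 + x ≠ 0 then 1 else 0)))
      (0, 0, tot)).2.2
    = tot + ((PySem.List.pyRange 0 (r + 1) 1).map (fun m => fval s a m r)).sum := by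
  by_cases hcase : r < (a.length : Int)
  · rw [if_pos hcase]
    rw [bInner s a (r + 1).toNat r rfl hcase 0 0 tot]
    rfl
  · rw [if_neg hcase]
    set L : Int := (a.length : Int) with hLdef
    have hLr : L ≤ r := by omega
    rw [bInner s a (L - 1 + 1).toNat (L - 1) rfl (by omega) 0 0 tot]
    simp only [show L - 1 + 1 = L from by ring]
    have hterm : ∀ m ∈ PySem.List.pyRange 0 L 1,
        gfin ((PySem.List.slice a (some m) (some L)).reverse.foldl (gstep s) (0, 0))
          = fval s a m r := by
      intro m hm
      have hm' := (PySem.List.mem_pyRange_one).mp hm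
      unfold fval
      rw [slice_clamp a m L (r + 1) (by omega) (by omega) (by omega)]
    rw [List.map_congr_left hterm]
    have hsplit : PySem.List.pyRange 0 (r + 1) 1
        = PySem.List.pyRange 0 L 1 ++ PySem.List.pyRange L (r + 1) 1 :=
      PySem.List.pyRange_one_append 0 L (r + 1) (by omega) (by omega)
    rw [hsplit, List.map_append, List.sum_append]
    have hzero : ∀ m ∈ PySem.List.pyRange L (r + 1) 1, fval s a m r = (fun _ => (0 : Int)) m := by
      intro m hm
      have hm' := (PySem.List.mem_pyRange_one).mp hm
      unfold fval
      rw [slice_past a m (r + 1) (by omega) (by omega)]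
      simp [gfin]
    rw [List.map_congr_left hzero]
    simp

theorem B_eq_sum (n s : Int) (a : List Int) :
    exam5_dicted_alt n s a =
      ((PySem.List.pyRange 0 n 1).map (fun r =>
        ((PySem.List.pyRange 0 (r + 1) 1).map (fun m => fval s a m r)).sum)).sum := by
  show (PySem.List.pyRange 0 n 1).foldl (fun (total : Int) r =>
    ((PySem.List.pyRange (if r < (a.length : Int) then r else (a.length : Int) - 1) (-1) (-1)).foldl
      (fun (st : Int × Int × Int) m =>
        let x := PySem.List.pyGetD a m 0
        if st.2.1 + x > s then
          (st.1 + 1, x, st.2.2 + (st.1 + 1) + (if x ≠ 0 then 1 else 0))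
        else
          (st.1, st.2.1 + x, st.2.2 + st.1 + (if st.2.1 + x ≠ 0 then 1 else 0)))
      (0, 0, total)).2.2) 0 = _
  rw [PySem.List.foldl_congr_mem (PySem.List.pyRange 0 n 1) _
    (fun (total : Int) r =>
      total + ((PySem.List.pyRange 0 (r + 1) 1).map (fun m => fval s a m r)).sum) 0
    (by
      intro acc r hr
      have hr' := (PySem.List.mem_pyRange_one).mp hr
      exact contrib s a r (by omega) acc)]
  rw [PySem.List.foldl_add]
  ring

-- ===== VERDICT (by name: the statement is the Claim_ definition above) =====
theorem exam5_dicted_spec : Claim_equal_exam5_dicted := by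
  intro n s a _
  unfold Spec_exam5_dicted
  rw [A_eq_sum, B_eq_sum, fvalA_eq]
  exact sum_swap n (fun m r => fval s a m r)
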